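-- pv_equiv track=rewrite | github.com/tezheng/ModelInsider | slice_context_fix.py | _module_name_to_onnx_path_variants
-- ===== SOURCE A (Python) =====
-- def _module_name_to_onnx_path_variants(module_name):
--     """Convert module name to potential ONNX path variants."""
--     variants = []
--
--     # Direct mapping: encoder.layer.0.attention.self -> /encoder/layer.0/attention/self
--     onnx_path = '/' + module_name.replace('.', '/')
--     variants.append(onnx_path)
--
--     # Partial paths for matching
--     parts = module_name.split('.')
--     for i in range(1, len(parts) + 1):
--         partial_path = '/' + '/'.join(parts[:i])
--         variants.append(partial_path)
--
--     return variants
-- ===== SOURCE B (Python) =====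
-- def _module_name_to_onnx_path_variants(module_name):
--     """Convert module name to potential ONNX path variants."""
--     prefixes = []
--     prefix = ''
--     for part in module_name.split('.'):
--         prefix = prefix + '/' + part
--         prefixes.append(prefix)
--     return [prefixes[-1]] + prefixes
-- ===== Notes on version B (the rewrite author's own statement) =====
-- stated objective: alternative
-- what changed: B drops A's replace-based full path and its per-index re-joining of parts[:i] ('/'.join for every i) in favour of a single accumulating pass that extends one running prefix string per part, taking the full-path first variant as the last accumulated prefix.
import Mathlib
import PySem

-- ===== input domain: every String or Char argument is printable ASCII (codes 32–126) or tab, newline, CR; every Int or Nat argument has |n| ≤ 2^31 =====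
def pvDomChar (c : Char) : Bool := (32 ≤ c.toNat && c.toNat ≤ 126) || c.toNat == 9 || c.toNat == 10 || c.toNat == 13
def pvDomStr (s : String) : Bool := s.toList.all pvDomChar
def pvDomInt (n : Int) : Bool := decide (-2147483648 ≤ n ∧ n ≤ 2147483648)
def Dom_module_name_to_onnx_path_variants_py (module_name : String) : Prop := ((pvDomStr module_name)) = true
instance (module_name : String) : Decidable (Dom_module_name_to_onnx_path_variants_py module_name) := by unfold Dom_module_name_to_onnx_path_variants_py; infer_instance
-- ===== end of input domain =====

-- B replaces A's replace-based full path and repeated `'/'.join(parts[:i])` re-joining by one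
-- accumulating pass over the parts, taking the full path as the last accumulated prefix.

-- ===== PORT A =====
def module_name_to_onnx_path_variants_py (module_name : String) : List String :=
  let variants : List String := []
  let onnx_path : String := "/" ++ PySem.Str.replace module_name "." "/"
  let variants := variants ++ [onnx_path]
  let parts : List String := (PySem.Str.split? module_name ".").getD []
  let variants := (PySem.List.pyRange 1 ((parts.length : Int) + 1)).foldl
    (fun acc i => acc ++ ["/" ++ PySem.Str.join "/" (PySem.List.slice parts none (some i))])
    variants
  variants

-- ===== PORT B =====
def module_name_to_onnx_path_variants_py_alt (module_name : String) : List String :=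
  let st := ((PySem.Str.split? module_name ".").getD []).foldl
    (fun (st : List String × String) part =>
      let p := st.2 ++ "/" ++ part
      (st.1 ++ [p], p))
    (([] : List String), "")
  let prefixes := st.1
  ((PySem.List.pyGet? prefixes (-1)).getD "") :: prefixes   -- prefixes[-1]; never none (split gives ≥ 1 part)

-- ===== PRECONDITION & SPEC =====
def Spec_module_name_to_onnx_path_variants_py (module_name : String) (out : List String) : Prop := out = module_name_to_onnx_path_variants_py_alt module_name
instance (module_name : String) (out : List String) : Decidable (Spec_module_name_to_onnx_path_variants_py module_name out) := by unfold Spec_module_name_to_onnx_path_variants_py; infer_instance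

-- ===== CLAIM (what is proved, stated in full; the proofs are below) =====
def Claim_equal_module_name_to_onnx_path_variants_py : Prop := ∀ (module_name : String), Dom_module_name_to_onnx_path_variants_py module_name → Spec_module_name_to_onnx_path_variants_py module_name (module_name_to_onnx_path_variants_py module_name)

-- ===== LEMMAS AND PROOFS =====

/-- `.` ↦ `/`, the character map `replace s "." "/"` performs. -/
def dotSlash (c : Char) : Char := if c = '.' then '/' else c

/-- Structural specification of splitting on `'.'` with a reversed current chunk. -/
def splitSpec : List Char → List Char → List (List Char)
  | [], cur => [cur.reverse]
  | c :: t, cur => if c = '.' then cur.reverse :: splitSpec t [] else splitSpec t (c :: cur)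

/-- Structural form of B's accumulating loop. -/
def prefixesFrom (p : String) : List String → List String
  | [] => []
  | x :: t => (p ++ "/" ++ x) :: prefixesFrom (p ++ "/" ++ x) t

theorem replace_go_single (cs : List Char) : ∀ (fuel : Nat) (acc : List Char),
    cs.length ≤ fuel →
    PySem.Chars.replace.go ['.'] ['/'] fuel cs acc = acc.reverse ++ cs.map dotSlash := by
  induction cs with
  | nil =>
    intro fuel acc _
    cases fuel <;> simp [PySem.Chars.replace.go]
  | cons c t ih =>
    intro fuel acc h
    cases fuel with
    | zero => simp at h
    | succ f =>
      by_cases hc : c = '.'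
      · subst hc
        simp [PySem.Chars.replace.go, List.isPrefixOf, ih f _ (by simpa using h), dotSlash]
      · simp [PySem.Chars.replace.go, List.isPrefixOf, hc, ih f _ (by simpa using h), dotSlash,
          Ne.symm hc]

theorem replace_single (cs : List Char) :
    PySem.Chars.replace cs ['.'] ['/'] = cs.map dotSlash := by
  simpa [PySem.Chars.replace] using replace_go_single cs cs.length [] le_rfl

theorem splitOn_go_single (cs : List Char) : ∀ (fuel : Nat) (cur : List Char) (acc : List (List Char)),
    cs.length < fuel →
    PySem.Chars.splitOn.go ['.'] fuel cs cur acc = acc.reverse ++ splitSpec cs cur := by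
  induction cs with
  | nil =>
    intro fuel cur acc h
    cases fuel with
    | zero => simp at h
    | succ f => simp [PySem.Chars.splitOn.go, splitSpec]
  | cons c t ih =>
    intro fuel cur acc h
    cases fuel with
    | zero => simp at h
    | succ f =>
      by_cases hc : c = '.'
      · subst hc
        simp [PySem.Chars.splitOn.go, List.isPrefixOf, splitSpec,
          ih f [] _ (by simpa using h)]
      · simp [PySem.Chars.splitOn.go, List.isPrefixOf, hc, splitSpec,
          ih f (c :: cur) _ (by simpa using h), Ne.symm hc]

theorem splitOn_single (cs : List Char) :
    PySem.Chars.splitOn cs ['.'] = splitSpec cs [] := by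
  simpa [PySem.Chars.splitOn] using splitOn_go_single cs (cs.length + 1) [] [] (by omega)

theorem splitSpec_ne_nil (cs cur : List Char) : splitSpec cs cur ≠ [] := by
  induction cs generalizing cur with
  | nil => simp [splitSpec]
  | cons c t ih => by_cases hc : c = '.' <;> simp [splitSpec, hc, ih]

theorem join_splitSpec (cs : List Char) : ∀ cur,
    PySem.Chars.join ['/'] (splitSpec cs cur) = cur.reverse ++ cs.map dotSlash := by
  induction cs with
  | nil => intro cur; simp [splitSpec, PySem.Chars.join, List.intercalate]
  | cons c t ih =>
    intro cur
    by_cases hc : c = '.'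
    · subst hc
      obtain ⟨b, l, hb⟩ := List.exists_cons_of_ne_nil (splitSpec_ne_nil t [])
      have h2 := ih []
      rw [hb] at h2
      simp only [List.reverse_nil, List.nil_append] at h2
      rw [show splitSpec ('.' :: t) cur = cur.reverse :: splitSpec t [] by simp [splitSpec], hb,
        PySem.Chars.join_cons_cons, h2]
      simp [dotSlash]
    · simpa [splitSpec, hc, dotSlash, Ne.symm hc] using ih (c :: cur)

theorem strJoin_singleton (x : String) : PySem.Str.join "/" [x] = x := by
  apply String.toList_inj.mp
  simp [PySem.Str.toList_join, PySem.Chars.join, List.intercalate]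

theorem strJoin_cons (x : String) (ys : List String) (h : ys ≠ []) :
    PySem.Str.join "/" (x :: ys) = x ++ "/" ++ PySem.Str.join "/" ys := by
  obtain ⟨b, l, hb⟩ := List.exists_cons_of_ne_nil h
  subst hb
  apply String.toList_inj.mp
  simp [PySem.Str.toList_join, PySem.Chars.join, List.intercalate]

theorem prefixesFrom_eq (L : List String) : ∀ p,
    prefixesFrom p L =
      (List.range L.length).map (fun k => p ++ "/" ++ PySem.Str.join "/" (L.take (k + 1))) := by
  induction L with
  | nil => intro p; simp [prefixesFrom]
  | cons x t ih =>
    intro p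
    cases t with
    | nil => simp [prefixesFrom, strJoin_singleton]
    | cons y u =>
      rw [show (x :: y :: u).length = (y :: u).length + 1 from rfl, List.range_succ_eq_map,
        List.map_cons, List.map_map]
      show (p ++ "/" ++ x) :: prefixesFrom (p ++ "/" ++ x) (y :: u) = _
      refine List.cons_eq_cons.mpr ⟨?_, ?_⟩
      · simp [strJoin_singleton]
      · rw [ih (p ++ "/" ++ x)]
        refine List.map_congr_left ?_
        intro k _
        have hne : (y :: u).take (k + 1) ≠ [] := by simp
        simp only [Function.comp_def]
        rw [show (x :: y :: u).take (Nat.succ k + 1) = x :: (y :: u).take (k + 1) from rfl,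
          strJoin_cons x _ hne]
        simp [String.append_assoc]

theorem foldB_fst (L : List String) : ∀ (acc : List String) (p : String),
    (L.foldl (fun (st : List String × String) part =>
        (st.1 ++ [st.2 ++ "/" ++ part], st.2 ++ "/" ++ part)) (acc, p)).1
      = acc ++ prefixesFrom p L := by
  induction L with
  | nil => intro acc p; simp [prefixesFrom]
  | cons x t ih => intro acc p; simp [prefixesFrom, ih]

theorem pyRange_one (n : Nat) : ∀ (a : Int),
    PySem.List.pyRange a (a + n) = (List.range n).map (fun k : Nat => a + (k : Int)) := by
  induction n with
  | zero => intro a; simp [PySem.List.pyRange]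
  | succ m ih =>
    intro a
    rw [PySem.List.pyRange_one_cons (by omega),
      show a + ((m + 1 : Nat) : Int) = (a + 1) + (m : Int) by push_cast; ring, ih (a + 1),
      List.range_succ_eq_map, List.map_cons, List.map_map]
    refine List.cons_eq_cons.mpr ⟨by simp, ?_⟩
    refine List.map_congr_left ?_
    intro k _
    simp only [Function.comp_def]
    push_cast
    ring

theorem pyGet?_neg_one {α : Type} (l : List α) (h : l ≠ []) :
    PySem.List.pyGet? l (-1) = l.getLast? := by
  have hl : 0 < l.length := List.length_pos_of_ne_nil h
  simp [PySem.List.pyGet?, PySem.List.pyIdx?, show -(l.length : Int) ≤ -1 by omega,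
    List.getLast?_eq_getElem?]

theorem range_succ_getLast? (n : Nat) : (List.range (n + 1)).getLast? = some n := by
  simp [List.range_succ]

-- ===== VERDICT (by name: the statement is the Claim_ definition above) =====
theorem module_name_to_onnx_path_variants_py_spec : Claim_equal_module_name_to_onnx_path_variants_py := by
  intro s _
  show module_name_to_onnx_path_variants_py s = module_name_to_onnx_path_variants_py_alt s
  have hsplit : (PySem.Str.split? s ".").getD [] = (splitSpec s.toList []).map String.ofList := by
    simp [PySem.Str.split?, PySem.Chars.split?, splitOn_single,
      show ".".toList = ['.'] from rfl]
  set L : List String := (splitSpec s.toList []).map String.ofList with hL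
  obtain ⟨n, hn⟩ : ∃ n, L.length = n + 1 := by
    cases hsp : splitSpec s.toList [] with
    | nil => exact absurd hsp (splitSpec_ne_nil s.toList [])
    | cons b l => exact ⟨l.length, by simp [hL, hsp]⟩
  have hhead : "/" ++ PySem.Str.replace s "." "/" = "/" ++ PySem.Str.join "/" L := by
    apply String.toList_inj.mp
    simp only [String.toList_append, PySem.Str.toList_replace, PySem.Str.toList_join, hL,
      List.map_map]
    rw [show ".".toList = ['.'] from rfl, show "/".toList = ['/'] from rfl, replace_single,
      show List.map (String.toList ∘ String.ofList) (splitSpec s.toList []) = splitSpec s.toList []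
        from by simp [Function.comp_def],
      join_splitSpec]
    simp
  have hA : module_name_to_onnx_path_variants_py s
      = ("/" ++ PySem.Str.replace s "." "/") ::
        (List.range L.length).map (fun k => "/" ++ PySem.Str.join "/" (L.take (k + 1))) := by
    simp only [module_name_to_onnx_path_variants_py, hsplit]
    rw [show ((L.length : Int) + 1) = 1 + (L.length : Int) by ring, pyRange_one L.length 1,
      PySem.List.foldl_append_eq_flatMap
        (fun i => ["/" ++ PySem.Str.join "/" (PySem.List.slice L none (some i))]),
      List.flatMap_map, List.nil_append]
    rw [← List.map_eq_flatMap]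
    refine List.cons_eq_cons.mpr ⟨rfl, List.map_congr_left ?_⟩
    intro k _
    rw [PySem.List.slice_to L (show (0 : Int) ≤ 1 + (k : Int) by omega),
      show ((1 : Int) + (k : Int)).toNat = k + 1 by omega]
  have hprefix : prefixesFrom "" L
      = (List.range L.length).map (fun k => "/" ++ PySem.Str.join "/" (L.take (k + 1))) := by
    rw [prefixesFrom_eq]
    refine List.map_congr_left ?_
    intro k _
    simp
  have hpne : prefixesFrom "" L ≠ [] := by
    rw [hprefix, hn]
    simp
  have hB : module_name_to_onnx_path_variants_py_alt s
      = ((PySem.List.pyGet? (prefixesFrom "" L) (-1)).getD "") :: prefixesFrom "" L := by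
    simp only [module_name_to_onnx_path_variants_py_alt, hsplit]
    rw [foldB_fst L [] ""]
    simp
  rw [hA, hB, hprefix, pyGet?_neg_one _ (by rw [hprefix] at hpne; exact hpne), hn,
    List.getLast?_map, range_succ_getLast?]
  simp only [Option.map_some, Option.getD_some]
  refine List.cons_eq_cons.mpr ⟨?_, rfl⟩
  rw [hhead]
  congr 1
  rw [show n + 1 = L.length from hn.symm, List.take_length]
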